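-- pv_equiv track=rewrite | github.com/SUhonzz/Softwaredesign2025 | libs/YMDUtil/src/YMDUtil/YMD.py | calcWeekNr
-- ===== SOURCE A (Python) =====
-- def isLeapYear(year :int) -> bool:
--
--     """Determine whether a year is a Gregorian leap year.
--
--     Args:
--         year (int): Year number (e.g., 2024).
--
--     Returns:
--         bool: True if leap year, otherwise False.
--
--     Examples:
--         >>> is_leap_year(2024)
--         True
--         >>> is_leap_year(1900)
--         False
--         >>> is_leap_year(2000)
--         True
--     """
--     if((year % 4 == 0 and year % 100 != 0) or year % 400 == 0):
--         return True
--     else: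
--         return False
--
-- def calcWeekNr (day: int, month: int, year: int) -> int:
--     """Calculate the week number for a given date."""
--     # Month offsets for week number calculation
--
--     # Calculate day of year
--     day_of_year = day
--     for m in range(1, month):
--         if m in [1, 3, 5, 7, 8, 10, 12]:
--             day_of_year += 31
--         elif m in [4, 6, 9, 11]:
--             day_of_year += 30
--         elif m == 2:
--             day_of_year += 29 if isLeapYear(year) else 28
--
--     # Calculate week number
--     week_number = (day_of_year // 7)
--     return week_number
-- ===== SOURCE B (Python) =====
-- def isLeapYear(year: int) -> bool:
--     return (year % 4 == 0 and year % 100 != 0) or year % 400 == 0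
--
-- # cumulative days before each month, counting February as 29 days
-- _CUM = [0, 31, 60, 91, 121, 152, 182, 213, 244, 274, 305, 335, 366]
--
-- def calcWeekNr(day: int, month: int, year: int) -> int:
--     idx = min(12, max(0, month - 1))
--     day_of_year = day + _CUM[idx] - (1 if month > 2 and not isLeapYear(year) else 0)
--     return day_of_year // 7
-- ===== Notes on version B (the rewrite author's own statement) =====
-- stated objective: faster
-- what changed: Replaced the per-month loop with a single precomputed cumulative-days table lookup (index clamped to [0,12]) plus a leap-day correction, then one floor division.
import Mathlib
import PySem

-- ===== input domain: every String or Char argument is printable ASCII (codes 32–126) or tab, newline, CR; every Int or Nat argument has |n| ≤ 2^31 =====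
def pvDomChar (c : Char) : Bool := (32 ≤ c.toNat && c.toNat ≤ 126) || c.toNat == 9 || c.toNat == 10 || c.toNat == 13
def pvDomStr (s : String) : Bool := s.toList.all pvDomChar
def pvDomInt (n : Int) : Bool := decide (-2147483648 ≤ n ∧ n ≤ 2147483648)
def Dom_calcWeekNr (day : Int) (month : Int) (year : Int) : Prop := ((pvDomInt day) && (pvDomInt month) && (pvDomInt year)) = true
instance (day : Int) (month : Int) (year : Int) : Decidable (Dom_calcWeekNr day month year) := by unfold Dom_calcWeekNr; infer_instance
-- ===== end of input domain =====

-- B replaces A's per-month loop with a clamped lookup in a cumulative-days table plus a leap-day correction (objective: simpler).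


-- ===== PORT A =====
def isLeapYear (year : Int) : Bool :=
  if (year % 4 == 0 && year % 100 != 0) || year % 400 == 0 then true else false

def calcWeekNr (day : Int) (month : Int) (year : Int) : Int :=
  let dayOfYear :=
    (PySem.List.pyRange 1 month 1).foldl
      (fun acc m =>
        if m ∈ ([1, 3, 5, 7, 8, 10, 12] : List Int) then acc + 31
        else if m ∈ ([4, 6, 9, 11] : List Int) then acc + 30
        else if m = 2 then acc + (if isLeapYear year then 29 else 28)
        else acc)
      day
  PySem.Int.floordiv dayOfYear 7

-- ===== PORT B =====
def pvLeap (year : Int) : Bool :=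
  (year % 4 == 0 && year % 100 != 0) || year % 400 == 0

-- cumulative days before each month, counting February as 29 days
def pvCum : List Int := [0, 31, 60, 91, 121, 152, 182, 213, 244, 274, 305, 335, 366]

def calcWeekNr_alt (day : Int) (month : Int) (year : Int) : Int :=
  let idx : Int := min 12 (max 0 (month - 1))
  let dayOfYear : Int :=
    day + pvCum.getD idx.toNat 0 - (if 2 < month ∧ pvLeap year = false then 1 else 0)
  PySem.Int.floordiv dayOfYear 7

-- ===== PRECONDITION & SPEC =====
def Spec_calcWeekNr (day : Int) (month : Int) (year : Int) (out : Int) : Prop := out = calcWeekNr_alt day month year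
instance (day : Int) (month : Int) (year : Int) (out : Int) : Decidable (Spec_calcWeekNr day month year out) := by unfold Spec_calcWeekNr; infer_instance

-- ===== CLAIM (what is proved, stated in full; the proofs are below) =====
def Claim_equal_calcWeekNr : Prop := ∀ (day : Int) (month : Int) (year : Int), Dom_calcWeekNr day month year → Spec_calcWeekNr day month year (calcWeekNr day month year)

-- ===== LEMMAS AND PROOFS =====

-- contribution of month m inside A's loop, as a function of the leap flag b
def pvContrib (b : Bool) (m : Int) : Int :=
  if m ∈ ([1, 3, 5, 7, 8, 10, 12] : List Int) then 31
  else if m ∈ ([4, 6, 9, 11] : List Int) then 30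
  else if m = 2 then (if b then 29 else 28)
  else 0

lemma pvStep_eq (b : Bool) (acc m : Int) :
    (if m ∈ ([1, 3, 5, 7, 8, 10, 12] : List Int) then acc + 31
     else if m ∈ ([4, 6, 9, 11] : List Int) then acc + 30
     else if m = 2 then acc + (if b then 29 else 28)
     else acc) = acc + pvContrib b m := by
  unfold pvContrib; split_ifs <;> ring

lemma pvFold_eq (b : Bool) (l : List Int) (a : Int) :
    l.foldl (fun acc m =>
      if m ∈ ([1, 3, 5, 7, 8, 10, 12] : List Int) then acc + 31
      else if m ∈ ([4, 6, 9, 11] : List Int) then acc + 30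
      else if m = 2 then acc + (if b then 29 else 28)
      else acc) a = a + (l.map (pvContrib b)).sum := by
  have hf : (fun acc m =>
      if m ∈ ([1, 3, 5, 7, 8, 10, 12] : List Int) then acc + 31
      else if m ∈ ([4, 6, 9, 11] : List Int) then acc + 30
      else if m = 2 then acc + (if b then 29 else 28)
      else acc) = fun (acc m : Int) => acc + pvContrib b m := funext fun acc => funext fun m => pvStep_eq b acc m
  rw [hf]
  induction l generalizing a with
  | nil => simp
  | cons x xs ih => rw [List.foldl_cons, ih, List.map_cons, List.sum_cons]; ring

lemma pvContrib_large (b : Bool) (m : Int) (h : 13 ≤ m) : pvContrib b m = 0 := by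
  unfold pvContrib
  have h1 : m ∉ ([1, 3, 5, 7, 8, 10, 12] : List Int) := by simp; omega
  have h2 : m ∉ ([4, 6, 9, 11] : List Int) := by simp; omega
  have h3 : m ≠ 2 := by omega
  simp [h1, h2, h3]

lemma pvSum_eq (b : Bool) (n : Nat) :
    ((PySem.List.pyRange 1 (1 + (n : Int)) 1).map (pvContrib b)).sum =
      pvCum.getD (min 12 n) 0 - (if 2 ≤ n ∧ b = false then 1 else 0) := by
  induction n with
  | zero => simp [PySem.List.pyRange_one_eq_nil, pvCum]
  | succ n ih =>
    have h : (1 : Int) ≤ 1 + (n : Int) := by omega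
    have : (1 : Int) + ((n : Nat) + 1 : Nat) = (1 + (n : Int)) + 1 := by push_cast; ring
    rw [this, PySem.List.pyRange_one_succ_right h]
    rw [List.map_append, List.sum_append, ih]
    simp only [List.map_cons, List.map_nil, List.sum_cons, List.sum_nil]
    by_cases hn : n < 12
    · interval_cases n <;> cases b <;> simp [pvContrib, pvCum]
    · have h13 : (13 : Int) ≤ 1 + (n : Int) := by omega
      rw [pvContrib_large b _ h13]
      have e1 : min 12 n = 12 := by omega
      have e2 : min 12 (n + 1) = 12 := by omega
      have e3 : 2 ≤ n := by omega
      have e4 : 2 ≤ n + 1 := by omega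
      simp [e1, e2, e3, e4]

-- ===== VERDICT (by name: the statement is the Claim_ definition above) =====
theorem calcWeekNr_spec : Claim_equal_calcWeekNr := by
  intro day month year _
  show calcWeekNr day month year = calcWeekNr_alt day month year
  unfold calcWeekNr calcWeekNr_alt
  rw [pvFold_eq (isLeapYear year)]
  have hleap : isLeapYear year = pvLeap year := by
    unfold isLeapYear pvLeap; split_ifs with h <;> simp_all
  rw [hleap]
  by_cases hm : month ≤ 1
  · rw [PySem.List.pyRange_one_eq_nil hm]
    have h1 : min 12 (max 0 (month - 1)) = 0 := by omega
    have h2 : ¬ (2 < month ∧ pvLeap year = false) := by omega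
    simp [h1, h2, pvCum]
  · have hm1 : (1 : Int) ≤ month := by omega
    set n : Nat := (month - 1).toNat with hn
    have hmon : month = 1 + (n : Int) := by omega
    rw [hmon, pvSum_eq]
    have e1 : (min 12 (max 0 (1 + (n : Int) - 1))).toNat = min 12 n := by omega
    have e2 : (2 < 1 + (n : Int)) ↔ (2 ≤ n) := by omega
    simp only [e1, e2]
    ring
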